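-- pv_equiv track=rewrite | github.com/jsnjuan/Competitive-Programming | Google'sCodingCompetitions/CodeJam/2018/QualificationRound/OnSite/SavingTheUniverseAgain_5_10pts.py | valor
-- ===== SOURCE A (Python) =====
-- def valor(cad):
--     d, sol = 1, 0
--     for l in cad:
--         if l == 'C':
--             d *= 2
--         else:
--             sol += d
--     return sol
-- ===== SOURCE B (Python) =====
-- def valor(cad):
--     # Scan right-to-left: a 'C' doubles what has been accumulated so far
--     # (the contribution of everything to its right), otherwise add 1.
--     sol = 0
--     for l in reversed(cad):
--         if l == 'C':
--             sol *= 2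
--         else:
--             sol += 1
--     return sol
-- ===== Notes on version B (the rewrite author's own statement) =====
-- stated objective: alternative
-- what changed: B scans the string in reverse, maintaining the final answer directly (doubling it on 'C', adding 1 otherwise) instead of A's forward pass with a separate pending multiplier.
import Mathlib
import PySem

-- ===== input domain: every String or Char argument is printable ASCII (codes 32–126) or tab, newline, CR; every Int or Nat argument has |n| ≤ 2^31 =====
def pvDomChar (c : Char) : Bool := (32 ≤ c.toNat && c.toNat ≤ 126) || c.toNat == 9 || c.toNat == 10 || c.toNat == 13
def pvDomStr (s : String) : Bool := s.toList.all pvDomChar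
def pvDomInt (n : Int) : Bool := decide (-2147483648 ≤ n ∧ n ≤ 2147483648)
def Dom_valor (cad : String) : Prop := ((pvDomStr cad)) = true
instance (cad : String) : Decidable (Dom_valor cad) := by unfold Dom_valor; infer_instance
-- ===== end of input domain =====

-- ===== PORT A =====
-- B scans in reverse maintaining the answer itself; A keeps a pending multiplier (alternative decomposition).
def valor (cad : String) : Int :=
  (cad.toList.foldl (fun (st : Int × Int) l =>
    if l == 'C' then (st.1 * 2, st.2) else (st.1, st.2 + st.1)) (1, 0)).2

-- ===== PORT B =====
def valor_alt (cad : String) : Int :=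
  cad.toList.reverse.foldl (fun (sol : Int) l =>
    if l == 'C' then sol * 2 else sol + 1) 0

-- ===== PRECONDITION & SPEC =====
def Spec_valor (cad : String) (out : Int) : Prop := out = valor_alt cad
instance (cad : String) (out : Int) : Decidable (Spec_valor cad out) := by unfold Spec_valor; infer_instance

-- ===== CLAIM (what is proved, stated in full; the proofs are below) =====
def Claim_equal_valor : Prop := ∀ (cad : String), Dom_valor cad → Spec_valor cad (valor cad)

-- ===== LEMMAS AND PROOFS =====

-- ===== VERDICT (by name: the statement is the Claim_ definition above) =====
theorem valor_foldl_inv (l : List Char) (d sol : Int) :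
    (l.foldl (fun (st : Int × Int) c =>
      if c == 'C' then (st.1 * 2, st.2) else (st.1, st.2 + st.1)) (d, sol)).2
    = sol + d * (l.reverse.foldl (fun (s : Int) c =>
        if c == 'C' then s * 2 else s + 1) 0) := by
  induction l generalizing d sol with
  | nil => simp
  | cons c l ih =>
    rw [List.foldl_cons, List.reverse_cons, List.foldl_append, List.foldl_cons, List.foldl_nil]
    split_ifs with h <;> rw [ih] <;> ring

theorem valor_spec : Claim_equal_valor := by
  intro cad _
  unfold Spec_valor valor valor_alt
  have h := valor_foldl_inv cad.toList 1 0
  simpa using h
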